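-- pv_equiv track=rewrite | github.com/BlackWaterPark0011010111/Basic-of-Syntax- | List/task1.py | find_brightest_pixel
-- ===== SOURCE A (Python) =====
-- def find_brightest_pixel(matrix):
--
--     max_val = -1
--     max_pos = (0, 0)
--
--     for i in range(len(matrix)):
--
--         for j in range(len(matrix[0])):
--
--             if matrix[i][j] > max_val:
--                 max_val = matrix[i][j]
--                 max_pos = (i, j)
--
--     return max_val, max_pos
-- ===== SOURCE B (Python) =====
-- def find_brightest_pixel(matrix):
--     w = min((len(row) for row in matrix), default=0)
--     candidates = []
--     if w > 0:
--         for i, row in enumerate(matrix):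
--             best_j = 0
--             best_v = row[0]
--             for j in range(1, w):
--                 if row[j] > best_v:
--                     best_j = j
--                     best_v = row[j]
--             candidates.append((i, best_j, best_v))
--     best_val = -1
--     best_pos = (0, 0)
--     for i, j, v in candidates:
--         if v > best_val:
--             best_val = v
--             best_pos = (i, j)
--     return best_val, best_pos
-- ===== Notes on version B (the rewrite author's own statement) =====
-- stated objective: alternative
-- what changed: Replaces A's single nested running-max loop with a two-pass decomposition: one pass computes each row's maximum and first argmax column as a candidate list, a second pass folds the candidates into the overall best, and the grid width is taken as the minimum row length instead of the first row's length (equal on A's whole non-raising domain).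
import Mathlib
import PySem

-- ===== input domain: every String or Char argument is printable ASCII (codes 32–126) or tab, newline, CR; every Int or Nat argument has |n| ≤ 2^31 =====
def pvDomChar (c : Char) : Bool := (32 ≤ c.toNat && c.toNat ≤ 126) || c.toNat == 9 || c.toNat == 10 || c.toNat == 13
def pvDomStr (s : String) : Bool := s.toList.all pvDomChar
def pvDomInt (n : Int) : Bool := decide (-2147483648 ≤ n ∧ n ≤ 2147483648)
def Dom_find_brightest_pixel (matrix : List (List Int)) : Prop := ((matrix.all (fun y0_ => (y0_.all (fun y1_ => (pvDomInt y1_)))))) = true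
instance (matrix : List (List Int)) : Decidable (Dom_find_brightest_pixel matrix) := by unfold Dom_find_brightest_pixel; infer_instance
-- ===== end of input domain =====

-- B replaces A's single nested running-max loop by a per-row candidate pass plus a fold over the
-- candidates (objective: alternative decomposition, same cost); equal on A's whole non-raising domain.

-- ===== PORT A =====
def find_brightest_pixel (matrix : List (List Int)) : Int × (Int × Int) :=
  (PySem.List.pyRange 0 (PySem.List.len matrix)).foldl
    (fun st i =>
      (PySem.List.pyRange 0 (PySem.List.len (PySem.List.pyGetD matrix 0 []))).foldl
        (fun st j =>
          if PySem.List.pyGetD (PySem.List.pyGetD matrix i []) j 0 > st.1 then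
            (PySem.List.pyGetD (PySem.List.pyGetD matrix i []) j 0, (i, j))
          else st)
        st)
    (-1, (0, 0))

-- ===== PORT B =====
def find_brightest_pixel_alt (matrix : List (List Int)) : Int × (Int × Int) :=
  let w : Int := PySem.List.minD (matrix.map (fun row => PySem.List.len row)) (fun x => x) 0
  let candidates : List (Int × (Int × Int)) :=
    if w > 0 then
      (PySem.List.enumerate matrix).foldl
        (fun acc p =>
          let b : Int × Int :=
            (PySem.List.pyRange 1 w).foldl
              (fun b j =>
                if PySem.List.pyGetD p.2 j 0 > b.2 then (j, PySem.List.pyGetD p.2 j 0) else b)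
              (0, PySem.List.pyGetD p.2 0 0)
          acc ++ [(p.1, b)]) []
    else []
  candidates.foldl
    (fun st c => if c.2.2 > st.1 then (c.2.2, (c.1, c.2.1)) else st)
    (-1, (0, 0))

-- ===== PRECONDITION & SPEC =====
-- Pre_ excludes exactly the inputs on which A raises IndexError: a row shorter than the first row.
def Pre_find_brightest_pixel (matrix : List (List Int)) : Prop :=
  ∀ row ∈ matrix, matrix.headI.length ≤ row.length
instance (matrix : List (List Int)) : Decidable (Pre_find_brightest_pixel matrix) := by
  unfold Pre_find_brightest_pixel; infer_instance
def pvWitness_find_brightest_pixel : List (List Int) := [[1, 2], [3, 4]]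

def Spec_find_brightest_pixel (matrix : List (List Int)) (out : Int × (Int × Int)) : Prop :=
  out = find_brightest_pixel_alt matrix
instance (matrix : List (List Int)) (out : Int × (Int × Int)) :
    Decidable (Spec_find_brightest_pixel matrix out) := by
  unfold Spec_find_brightest_pixel; infer_instance

-- ===== CLAIM (what is proved, stated in full; the proofs are below) =====
def Claim_equal_find_brightest_pixel : Prop :=
  ∀ (matrix : List (List Int)), Dom_find_brightest_pixel matrix →
    Pre_find_brightest_pixel matrix →
    Spec_find_brightest_pixel matrix (find_brightest_pixel matrix)

-- ===== LEMMAS AND PROOFS =====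

-- (value, column) of the first maximum of row[a], row[a+1], …, row[a+n-1] (read through pyGetD,
-- default 0), resolving ties to the smallest column: the common spec of both inner loops.
def pvFirstMax (row : List Int) : Nat → Int → Option (Int × Int)
  | 0, _ => none
  | n + 1, a =>
    match pvFirstMax row n (a + 1) with
    | none => some (PySem.List.pyGetD row a 0, a)
    | some (v, j) =>
        if v > PySem.List.pyGetD row a 0 then some (v, j)
        else some (PySem.List.pyGetD row a 0, a)

theorem pvInnerA (row : List Int) (n : Nat) :
    ∀ (a : Int) (st : Int × (Int × Int)) (i : Int),
    (PySem.List.pyRange a (a + n)).foldl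
      (fun st j =>
        if PySem.List.pyGetD row j 0 > st.1 then (PySem.List.pyGetD row j 0, (i, j)) else st)
      st
    = match pvFirstMax row n a with
      | none => st
      | some (v, j) => if v > st.1 then (v, (i, j)) else st := by
  induction n with
  | zero =>
      intro a st i
      rw [PySem.List.pyRange_one_eq_nil (by omega)]
      simp [pvFirstMax]
  | succ n ih =>
      intro a st i
      rw [PySem.List.pyRange_one_cons (by omega)]
      simp only [List.foldl_cons]
      have harg : a + ((n : Int) + 1) = (a + 1) + n := by ring
      rw [show (((n : Nat) + 1 : Nat) : Int) = ((n : Int) + 1) by push_cast; ring, harg,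
        ih (a + 1) _ i]
      cases h : pvFirstMax row n (a + 1) with
      | none => simp [pvFirstMax, h]
      | some vj =>
          obtain ⟨v, j⟩ := vj
          simp only [pvFirstMax, h]
          split_ifs <;> simp_all <;> omega

theorem pvInnerB (row : List Int) (n : Nat) :
    ∀ (a : Int) (b : Int × Int),
    (PySem.List.pyRange a (a + n)).foldl
      (fun b j =>
        if PySem.List.pyGetD row j 0 > b.2 then (j, PySem.List.pyGetD row j 0) else b)
      b
    = match pvFirstMax row n a with
      | none => b
      | some (v, j) => if v > b.2 then (j, v) else b := by
  induction n with
  | zero =>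
      intro a b
      rw [PySem.List.pyRange_one_eq_nil (by omega)]
      simp [pvFirstMax]
  | succ n ih =>
      intro a b
      rw [PySem.List.pyRange_one_cons (by omega)]
      simp only [List.foldl_cons]
      have harg : a + ((n : Int) + 1) = (a + 1) + n := by ring
      rw [show (((n : Nat) + 1 : Nat) : Int) = ((n : Int) + 1) by push_cast; ring, harg,
        ih (a + 1) _]
      cases h : pvFirstMax row n (a + 1) with
      | none => simp [pvFirstMax, h]
      | some vj =>
          obtain ⟨v, j⟩ := vj
          simp only [pvFirstMax, h]
          split_ifs <;> simp_all <;> omega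

-- Under Pre_, the minimum row length is the first row's length.
theorem pvMinWidth (matrix : List (List Int)) (hpre : Pre_find_brightest_pixel matrix) :
    PySem.List.minD (matrix.map (fun row => PySem.List.len row)) (fun x => x) 0
      = PySem.List.len (PySem.List.pyGetD matrix 0 []) := by
  cases matrix with
  | nil => simp [PySem.List.minD, PySem.List.min?, PySem.List.pyGetD, PySem.List.len]
  | cons r rs =>
      have hmem : PySem.List.len r ∈ (r :: rs).map (fun row => PySem.List.len row) := by
        simp
      cases hm : PySem.List.min? ((r :: rs).map (fun row => PySem.List.len row))
          (fun x => x) with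
      | none =>
          have hnil := (PySem.List.min?_eq_none_iff _ _).mp hm
          simp at hnil
      | some m =>
          have h1 : m ≤ PySem.List.len r := PySem.List.min?_isMin hm _ hmem
          have h2 : PySem.List.len r ≤ m := by
            have hm' := PySem.List.min?_mem hm
            simp only [List.mem_map] at hm'
            obtain ⟨row, hrow, rfl⟩ := hm'
            have := hpre row hrow
            simp only [List.headI] at this
            simp [PySem.List.len]
            omega
          have hmr : m = PySem.List.len r := le_antisymm h1 h2
          calc PySem.List.minD ((r :: rs).map (fun row => PySem.List.len row)) (fun x => x) 0
              = (PySem.List.min? ((r :: rs).map (fun row => PySem.List.len row))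
                  (fun x => x)).getD 0 := rfl
            _ = m := by rw [hm]; rfl
            _ = PySem.List.len r := hmr
            _ = PySem.List.len (PySem.List.pyGetD (r :: rs) 0 []) := by
                  rw [PySem.List.pyGetD_zero_cons]

theorem find_brightest_pixel_eq (matrix : List (List Int))
    (hpre : Pre_find_brightest_pixel matrix) :
    find_brightest_pixel matrix = find_brightest_pixel_alt matrix := by
  unfold find_brightest_pixel find_brightest_pixel_alt
  rw [pvMinWidth matrix hpre]
  set w := PySem.List.len (PySem.List.pyGetD matrix 0 []) with hw
  have hw0 : 0 ≤ w := by
    simp [hw, PySem.List.len]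
  -- rewrite A's outer loop as a fold over enumerate matrix
  have hA :
      (PySem.List.pyRange 0 (PySem.List.len matrix)).foldl
        (fun st i =>
          (PySem.List.pyRange 0 w).foldl
            (fun st j =>
              if PySem.List.pyGetD (PySem.List.pyGetD matrix i []) j 0 > st.1 then
                (PySem.List.pyGetD (PySem.List.pyGetD matrix i []) j 0, (i, j))
              else st)
            st)
        ((-1 : Int), ((0 : Int), (0 : Int)))
      = (PySem.List.enumerate matrix).foldl
          (fun st p =>
            (PySem.List.pyRange 0 w).foldl
              (fun st j =>
                if PySem.List.pyGetD p.2 j 0 > st.1 then (PySem.List.pyGetD p.2 j 0, (p.1, j))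
                else st)
              st)
          ((-1 : Int), ((0 : Int), (0 : Int))) := by
    rw [PySem.List.enumerate_eq_map_pyRange matrix [], List.foldl_map]
  rw [hA]
  by_cases hpos : w > 0
  · -- positive width: candidate list is a map over enumerate matrix
    simp only [if_pos hpos]
    rw [PySem.List.foldl_append_singleton_eq_map, List.nil_append, List.foldl_map]
    apply PySem.List.foldl_congr_mem
    intro st p _
    obtain ⟨n, hn⟩ := Int.eq_ofNat_of_zero_le hw0
    obtain ⟨m, rfl⟩ : ∃ m, n = m + 1 := ⟨n - 1, by omega⟩
    have hA' := pvInnerA p.2 (m + 1) 0 st p.1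
    have hB' := pvInnerB p.2 m 1 (0, PySem.List.pyGetD p.2 0 0)
    simp only [Nat.cast_add, Nat.cast_one, zero_add] at hA'
    rw [show (1 : Int) + (m : Nat) = (m : Int) + 1 from by ring] at hB'
    rw [show w = (m : Int) + 1 from by push_cast at hn ⊢; omega, hA', hB']
    have hdef : pvFirstMax p.2 (m + 1) 0 =
        match pvFirstMax p.2 m 1 with
        | none => some (PySem.List.pyGetD p.2 0 0, 0)
        | some (v, j) =>
            if v > PySem.List.pyGetD p.2 0 0 then some (v, j)
            else some (PySem.List.pyGetD p.2 0 0, 0) := by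
      simp [pvFirstMax]
    rw [hdef]
    cases h : pvFirstMax p.2 m 1 with
    | none => simp
    | some vj =>
        obtain ⟨v, j⟩ := vj
        simp only
        split_ifs <;> simp_all
  · -- zero width: both sides are the initial state
    have hwz : w = 0 := by omega
    simp only [if_neg hpos]
    rw [hwz]
    have : ∀ st : Int × (Int × Int), ∀ p : Int × List Int,
        (PySem.List.pyRange 0 (0 : Int)).foldl
          (fun st j =>
            if PySem.List.pyGetD p.2 j 0 > st.1 then (PySem.List.pyGetD p.2 j 0, (p.1, j))
            else st)
          st = st := by
      intro st p
      rw [PySem.List.pyRange_one_eq_nil le_rfl]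
      rfl
    rw [PySem.List.foldl_congr_mem _ _ (fun st _ => st) _ (fun st p _ => this st p)]
    rw [PySem.List.foldl_ignore]
    rfl

-- ===== VERDICT (by name: the statement is the Claim_ definition above) =====
theorem find_brightest_pixel_spec : Claim_equal_find_brightest_pixel := by
  intro matrix _ hpre
  unfold Spec_find_brightest_pixel
  exact find_brightest_pixel_eq matrix hpre
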